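-- pv_equiv track=rewrite | github.com/shs395/algorithm | programmers/Lv2/JadenCase_문자열_만들기.py | solution
-- ===== SOURCE A (Python) =====
-- def solution(s):
--     answer = ''
--     isblank = True
--     for c in s:
--         if isblank == True and c != ' ':
--             answer += c.upper()
--             isblank = False
--         elif c == ' ':
--             answer += c
--             isblank = True
--         else:
--             answer += c.lower()
--     return answer
-- ===== SOURCE B (Python) =====
-- def solution(s):
--     return ' '.join(w[:1].upper() + w[1:].lower() for w in s.split(' '))
-- ===== Notes on version B (the rewrite author's own statement) =====
-- stated objective: idiomatic
-- what changed: Replaces the char-by-char isblank state machine with a split-on-single-space / per-word capitalize / join pipeline; bulk str methods in C replace a per-character Python loop.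
import Mathlib
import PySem

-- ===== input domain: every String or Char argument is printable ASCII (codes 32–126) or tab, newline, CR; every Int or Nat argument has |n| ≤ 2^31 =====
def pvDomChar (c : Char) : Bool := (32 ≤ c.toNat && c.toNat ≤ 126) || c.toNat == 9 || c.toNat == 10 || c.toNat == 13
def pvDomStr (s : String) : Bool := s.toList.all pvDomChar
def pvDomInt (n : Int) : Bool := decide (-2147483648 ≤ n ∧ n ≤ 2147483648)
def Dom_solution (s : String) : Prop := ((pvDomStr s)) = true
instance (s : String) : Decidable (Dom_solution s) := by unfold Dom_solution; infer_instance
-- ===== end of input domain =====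

-- B replaces A's char-by-char isblank state machine by split(' ') / capitalize each word / ' '.join (idiomatic).

-- ===== PORT A =====
-- the for-loop with its (answer, isblank) state, as structural recursion over the chars
def solutionGo : List Char → List Char → Bool → List Char
  | [], answer, _ => answer
  | c :: rest, answer, isblank =>
    if isblank = true && !(c = ' ') then solutionGo rest (answer ++ PySem.Chars.upper [c]) false
    else if c = ' ' then solutionGo rest (answer ++ [c]) true
    else solutionGo rest (answer ++ PySem.Chars.lower [c]) false

def solution (s : String) : String := String.ofList (solutionGo s.toList [] true)

-- ===== PORT B =====
-- w[:1].upper() + w[1:].lower()  (slices w[:1]/w[1:] are take 1 / drop 1, exact)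
def jadenWord (w : List Char) : List Char :=
  PySem.Chars.upper (w.take 1) ++ PySem.Chars.lower (w.drop 1)

def solution_alt (s : String) : String :=
  String.ofList (PySem.Chars.join [' '] (((s.toList).splitOn ' ').map jadenWord))

-- ===== PRECONDITION & SPEC =====
def Spec_solution (s : String) (out : String) : Prop := out = solution_alt s
instance (s : String) (out : String) : Decidable (Spec_solution s out) := by unfold Spec_solution; infer_instance

-- ===== CLAIM (what is proved, stated in full; the proofs are below) =====
def Claim_equal_solution : Prop := ∀ (s : String), Dom_solution s → Spec_solution s (solution s)

-- ===== LEMMAS AND PROOFS =====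
theorem jaden_join_cons_append (sep x y : List Char) (t : List (List Char)) :
    PySem.Chars.join sep ((x ++ y) :: t) = x ++ PySem.Chars.join sep (y :: t) := by
  cases t with
  | nil => simp [PySem.Chars.join_singleton]
  | cons b bs => simp [PySem.Chars.join_cons_cons]

theorem jaden_go_spec (cs : List Char) : ∀ (acc w : List Char) (ws : List (List Char)),
    cs.splitOn ' ' = w :: ws →
    solutionGo cs acc true = acc ++ PySem.Chars.join [' '] ((w :: ws).map jadenWord) ∧
    solutionGo cs acc false =
      acc ++ PySem.Chars.join [' '] (PySem.Chars.lower w :: ws.map jadenWord) := by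
  induction cs with
  | nil =>
    intro acc w ws h
    simp [List.splitOn, List.splitOnP_nil] at h
    obtain ⟨hw, hws⟩ := h
    subst hw; subst hws
    simp [solutionGo, jadenWord, PySem.Chars.join_singleton, PySem.Chars.lower, PySem.Chars.upper]
  | cons c cs ih =>
    intro acc w ws h
    by_cases hc : c = ' '
    · subst hc
      rw [List.splitOn, List.splitOnP_cons] at h
      simp only [beq_self_eq_true, if_true] at h
      obtain ⟨w', ws', hsplit⟩ : ∃ w' ws', cs.splitOn ' ' = w' :: ws' := by
        rcases hcs : cs.splitOn ' ' with _ | ⟨a, b⟩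
        · exact absurd hcs (List.splitOnP_ne_nil _ cs)
        · exact ⟨a, b, rfl⟩
      rw [show List.splitOnP (fun x => x == ' ') cs = cs.splitOn ' ' from rfl, hsplit] at h
      obtain ⟨hw, hws⟩ := List.cons.inj h
      subst hw; subst hws
      have hIH := (ih (acc ++ [' ']) w' ws' hsplit)
      constructor
      · rw [show solutionGo (' ' :: cs) acc true = solutionGo cs (acc ++ [' ']) true from by
          simp [solutionGo]]
        rw [hIH.1]
        simp [jadenWord, PySem.Chars.upper, PySem.Chars.lower, PySem.Chars.join_cons_cons]
      · rw [show solutionGo (' ' :: cs) acc false = solutionGo cs (acc ++ [' ']) true from by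
          simp [solutionGo]]
        rw [hIH.1]
        simp [PySem.Chars.lower, PySem.Chars.join_cons_cons]
    · rw [List.splitOn, List.splitOnP_cons] at h
      simp only [beq_iff_eq, hc, if_false] at h
      obtain ⟨w', ws', hsplit⟩ : ∃ w' ws', cs.splitOn ' ' = w' :: ws' := by
        rcases hcs : cs.splitOn ' ' with _ | ⟨a, b⟩
        · exact absurd hcs (List.splitOnP_ne_nil _ cs)
        · exact ⟨a, b, rfl⟩
      rw [show List.splitOnP (fun x => x == ' ') cs = cs.splitOn ' ' from rfl, hsplit,
        List.modifyHead] at h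
      obtain ⟨hw, hws⟩ := List.cons.inj h
      subst hw; subst hws
      constructor
      · rw [show solutionGo (c :: cs) acc true =
            solutionGo cs (acc ++ PySem.Chars.upper [c]) false from by
          simp [solutionGo, hc]]
        have hIH := (ih (acc ++ PySem.Chars.upper [c]) w' ws' hsplit).2
        rw [hIH]
        simp only [List.map_cons]
        rw [show jadenWord (c :: w') = PySem.Chars.upper [c] ++ PySem.Chars.lower w' from by
          simp [jadenWord]]
        rw [jaden_join_cons_append]
        simp
      · rw [show solutionGo (c :: cs) acc false =
            solutionGo cs (acc ++ PySem.Chars.lower [c]) false from by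
          simp [solutionGo, hc]]
        have hIH := (ih (acc ++ PySem.Chars.lower [c]) w' ws' hsplit).2
        rw [hIH]
        rw [show PySem.Chars.lower (c :: w') = PySem.Chars.lower [c] ++ PySem.Chars.lower w' from by
          simp [PySem.Chars.lower]]
        rw [jaden_join_cons_append]
        simp

-- ===== VERDICT (by name: the statement is the Claim_ definition above) =====
theorem solution_spec : Claim_equal_solution := by
  intro s _
  unfold Spec_solution solution solution_alt
  obtain ⟨w, ws, hsplit⟩ : ∃ w ws, s.toList.splitOn ' ' = w :: ws := by
    rcases hcs : s.toList.splitOn ' ' with _ | ⟨a, b⟩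
    · exact absurd hcs (List.splitOnP_ne_nil _ s.toList)
    · exact ⟨a, b, rfl⟩
  rw [(jaden_go_spec s.toList [] w ws hsplit).1, hsplit]
  simp
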